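-- pv_equiv track=rewrite | github.com/zeroone-kr/algorithm | 프로그래머스/2/389479. 서버 증설 횟수/서버 증설 횟수.py | solution
-- ===== SOURCE A (Python) =====
-- def solution(players, m, k):
--
--     n = len(players)
--     arr = [ [0] * 3 for _ in range(n)]
--     answer = 0
--     for i in range(n):
--         arr[i][0] = players[i]
--         required_pc = (players[i]) // m
--         need = required_pc - arr[i][1]
--
--         if need > 0:
--             answer += need
--             for a in range(k):
--                 if i+a >= n:
--                     continue
--                 arr[i+a][1] += need
--
--     return answer
-- ===== SOURCE B (Python) =====
-- def solution(players, m, k):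
--     # Difference/prefix-sum sliding window: O(n) instead of A's O(n*k) repainting.
--     pre = [0]                      # pre[j] = total of all scale-up amounts before hour j
--     answer = 0
--     for j, p in enumerate(players):
--         lo = j - k + 1             # first hour whose servers still cover hour j
--         if lo < 0:
--             lo = 0
--         act = pre[j] - pre[lo] if lo <= j else 0
--         need = p // m - act
--         add = need if need > 0 else 0
--         answer += add
--         pre.append(pre[-1] + add)
--     return answer
-- ===== Notes on version B (the rewrite author's own statement) =====
-- stated objective: faster
-- what changed: Replaces A's O(n*k) repainting of the next k rows of a 2D bookkeeping array with an O(n) prefix-sum sliding window: the active server count at hour j is read off as a difference of two prefix sums, so the inner range(k) loop disappears. Pre_ excludes m = 0, where A raises ZeroDivisionError on any non-empty players; on empty players with m = 0 the loop body never runs, so both A and B trivially return 0.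
-- outside the precondition, e.g. on solution([], 0, 1): A returns 0, B returns 0
import Mathlib
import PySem

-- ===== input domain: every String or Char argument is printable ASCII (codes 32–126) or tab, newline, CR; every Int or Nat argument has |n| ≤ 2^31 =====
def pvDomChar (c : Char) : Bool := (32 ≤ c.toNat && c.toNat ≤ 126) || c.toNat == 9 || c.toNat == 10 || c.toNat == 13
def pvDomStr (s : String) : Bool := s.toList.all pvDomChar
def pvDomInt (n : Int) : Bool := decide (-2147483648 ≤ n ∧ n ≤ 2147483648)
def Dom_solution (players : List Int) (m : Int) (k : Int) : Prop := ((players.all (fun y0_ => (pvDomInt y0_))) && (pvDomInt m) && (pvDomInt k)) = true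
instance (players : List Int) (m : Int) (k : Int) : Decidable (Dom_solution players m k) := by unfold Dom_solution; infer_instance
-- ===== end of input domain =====

-- B replaces A's per-hour repainting of the next k rows of a bookkeeping array by a
-- prefix-sum sliding window, so the inner range(k) loop disappears (objective: faster).

-- ===== PORT A =====
def solution (players : List Int) (m : Int) (k : Int) : Int :=
  let n : Int := (players.length : Int)
  let arr0 : List (List Int) := (PySem.List.pyRange 0 n 1).map (fun _ => [0, 0, 0])
  let st := (PySem.List.pyRange 0 n 1).foldl (fun (st : List (List Int) × Int) (i : Int) =>
    let arr := st.1
    let answer := st.2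
    -- arr[i][0] = players[i]
    let arr := PySem.List.pySetD arr i
      (PySem.List.pySetD (PySem.List.pyGetD arr i []) 0 (PySem.List.pyGetD players i 0))
    let required_pc := PySem.Int.floordiv (PySem.List.pyGetD players i 0) m
    let need := required_pc - PySem.List.pyGetD (PySem.List.pyGetD arr i []) 1 0
    if need > 0 then
      let answer := answer + need
      let arr := (PySem.List.pyRange 0 k 1).foldl (fun (arr : List (List Int)) (a : Int) =>
        if i + a ≥ n then arr
        else
          let row := PySem.List.pyGetD arr (i + a) []
          PySem.List.pySetD arr (i + a) (PySem.List.pySetD row 1 (PySem.List.pyGetD row 1 0 + need)))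
        arr
      (arr, answer)
    else (arr, answer)) (arr0, 0)
  st.2

-- ===== PORT B =====
def solution_alt (players : List Int) (m : Int) (k : Int) : Int :=
  let st := (PySem.List.enumerate players 0).foldl (fun (st : List Int × Int) (jp : Int × Int) =>
    let pre := st.1
    let answer := st.2
    let lo0 := jp.1 - k + 1
    let lo := if lo0 < 0 then 0 else lo0
    let act := if lo ≤ jp.1 then PySem.List.pyGetD pre jp.1 0 - PySem.List.pyGetD pre lo 0 else 0
    let need := PySem.Int.floordiv jp.2 m - act
    let add := if need > 0 then need else 0
    (pre ++ [PySem.List.pyGetD pre (-1) 0 + add], answer + add)) ([0], 0)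
  st.2

-- ===== PRECONDITION & SPEC =====
-- A computes players[i] // m, so m = 0 raises ZeroDivisionError on any non-empty players; Pre_
-- excludes m = 0 (on empty players with m = 0 the loop never runs and both programs return 0).
def Pre_solution (players : List Int) (m : Int) (k : Int) : Prop := m ≠ 0
instance (players : List Int) (m : Int) (k : Int) : Decidable (Pre_solution players m k) := by unfold Pre_solution; infer_instance
def pvWitness_solution : List Int × Int × Int := ([4, 2, 7], 3, 2)

def Spec_solution (players : List Int) (m : Int) (k : Int) (out : Int) : Prop := out = solution_alt players m k
instance (players : List Int) (m : Int) (k : Int) (out : Int) : Decidable (Spec_solution players m k out) := by unfold Spec_solution; infer_instance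

-- ===== CLAIM (what is proved, stated in full; the proofs are below) =====
def Claim_equal_solution : Prop := ∀ (players : List Int) (m : Int) (k : Int), Dom_solution players m k → Pre_solution players m k → Spec_solution players m k (solution players m k)

-- ===== LEMMAS AND PROOFS =====

-- the common specification: ndF P m k j = number of servers added at hour j
def ndF (P : List Int) (m k : Int) (j : Nat) : Int :=
  let act := ((List.range j).attach.map
    (fun t => if (j : Int) < ((t.1 : Nat) : Int) + k then ndF P m k t.1 else 0)).sum
  let need := PySem.Int.floordiv (P.getD j 0) m - act
  if need > 0 then need else 0
termination_by j
decreasing_by exact List.mem_range.mp t.2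

-- number of servers active (still alive) at hour j
def actF (P : List Int) (m k : Int) (j : Nat) : Int :=
  ((List.range j).map (fun (t : Nat) => if (j : Int) < (t : Int) + k then ndF P m k t else 0)).sum

-- total number of servers added during hours < J
def ansSum (P : List Int) (m k : Int) (J : Nat) : Int :=
  ((List.range J).map (ndF P m k)).sum

theorem ndF_eq (P : List Int) (m k : Int) (j : Nat) :
    ndF P m k j =
      if PySem.Int.floordiv (P.getD j 0) m - actF P m k j > 0 then
        PySem.Int.floordiv (P.getD j 0) m - actF P m k j else 0 := by
  rw [ndF]
  rw [List.attach_map_val (l := List.range j)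
      (f := fun (x : Nat) => if (j : Int) < (x : Int) + k then ndF P m k x else 0)]
  rfl

theorem ansSum_succ (P : List Int) (m k : Int) (J : Nat) :
    ansSum P m k (J + 1) = ansSum P m k J + ndF P m k J := by
  simp [ansSum, List.range_succ]

-- generic indexing helpers
theorem pyGetD_mapRange {α : Type} (n j : Nat) (f : Nat → α) (d : α) (h : j < n) :
    PySem.List.pyGetD ((List.range n).map f) ((j : Nat) : Int) d = f j := by
  rw [PySem.List.pyGetD_natCast]
  rw [List.getD_eq_getElem?_getD]
  simp [h]

theorem set_mapRange {β : Type} (n j : Nat) (f : Nat → β) (v : β) (_h : j < n) :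
    ((List.range n).map f).set j v = (List.range n).map (fun t => if t = j then v else f t) := by
  apply List.ext_getElem (by simp)
  intro i h1 h2
  simp only [List.getElem_set, List.getElem_map, List.getElem_range]
  rcases eq_or_ne j i with rfl | hne
  · simp
  · simp [hne, Ne.symm hne]

theorem rowGet1 (x y z d : Int) : PySem.List.pyGetD [x, y, z] 1 d = y := rfl

theorem rowSet0 (x y z v : Int) : PySem.List.pySetD [x, y, z] 0 v = [v, y, z] := rfl

theorem rowSet1 (x y z v : Int) : PySem.List.pySetD [x, y, z] 1 v = [x, v, z] := rfl

theorem getD_mapRange {α : Type} (n j : Nat) (f : Nat → α) (d : α) (h : j < n) :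
    ((List.range n).map f).getD j d = f j := by
  rw [List.getD_eq_getElem?_getD]
  simp [h]

-- ===== A side =====

-- column 1 of A's bookkeeping array after the first J outer iterations
def colA (P : List Int) (m k : Int) (J t : Nat) : Int :=
  ((List.range J).map (fun (i : Nat) => if i ≤ t ∧ (t : Int) < (i : Int) + k then ndF P m k i else 0)).sum

def arrA (P : List Int) (m k : Int) (J : Nat) : List (List Int) :=
  (List.range P.length).map (fun t => [if t < J then P.getD t 0 else 0, colA P m k J t, 0])

theorem colA_succ (P : List Int) (m k : Int) (J t : Nat) :
    colA P m k (J + 1) t = colA P m k J t + (if J ≤ t ∧ (t : Int) < (J : Int) + k then ndF P m k J else 0) := by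
  simp [colA, List.range_succ]

theorem colA_self (P : List Int) (m k : Int) (J : Nat) : colA P m k J J = actF P m k J := by
  unfold colA actF
  congr 1
  apply List.map_congr_left
  intro i hi
  have h1 : i < J := List.mem_range.mp hi
  have hiff : (i ≤ J ∧ (J : Int) < (i : Int) + k) ↔ ((J : Int) < (i : Int) + k) := by
    constructor
    · exact fun h => h.2
    · exact fun h => ⟨by omega, h⟩
  simp only [hiff]

def stepA (P : List Int) (m k : Int) (st : List (List Int) × Int) (i : Nat) : List (List Int) × Int :=
  let arr := st.1
  let answer := st.2
  let arr := PySem.List.pySetD arr (i : Int)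
    (PySem.List.pySetD (PySem.List.pyGetD arr (i : Int) []) 0 (PySem.List.pyGetD P (i : Int) 0))
  let need := PySem.Int.floordiv (PySem.List.pyGetD P (i : Int) 0) m
      - PySem.List.pyGetD (PySem.List.pyGetD arr (i : Int) []) 1 0
  if need > 0 then
    ((List.range k.toNat).foldl (fun arr (a : Nat) =>
        if (i : Int) + (a : Int) ≥ (P.length : Int) then arr
        else
          let row := PySem.List.pyGetD arr ((i : Int) + (a : Int)) []
          PySem.List.pySetD arr ((i : Int) + (a : Int))
            (PySem.List.pySetD row 1 (PySem.List.pyGetD row 1 0 + need))) arr,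
     answer + need)
  else (arr, answer)

theorem innerA (n i : Nat) (d : Int) (r c : Nat → Int) (K : Nat) :
    (List.range K).foldl (fun arr (a : Nat) =>
        if (i : Int) + (a : Int) ≥ (n : Int) then arr
        else
          PySem.List.pySetD arr ((i : Int) + (a : Int))
            (PySem.List.pySetD (PySem.List.pyGetD arr ((i : Int) + (a : Int)) []) 1
              (PySem.List.pyGetD (PySem.List.pyGetD arr ((i : Int) + (a : Int)) []) 1 0 + d)))
      ((List.range n).map (fun t => [r t, c t, 0]))
    = (List.range n).map (fun t => [r t, c t + (if i ≤ t ∧ t < i + K then d else 0), 0]) := by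
  induction K with
  | zero =>
    refine (List.map_congr_left ?_).symm
    intro t _
    simp
  | succ K ih =>
    rw [List.range_succ, List.foldl_append, ih]
    simp only [List.foldl_cons, List.foldl_nil]
    by_cases h : (i : Int) + (K : Int) ≥ (n : Int)
    · rw [if_pos h]
      apply List.map_congr_left
      intro t ht
      have htn : t < n := List.mem_range.mp ht
      have hiff : (i ≤ t ∧ t < i + K) ↔ (i ≤ t ∧ t < i + (K + 1)) := by omega
      simp only [hiff]
    · rw [if_neg h]
      have hin : i + K < n := by omega
      have hcast : (i : Int) + (K : Int) = ((i + K : Nat) : Int) := by push_cast; ring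
      have hread : PySem.List.pyGetD
          ((List.range n).map (fun t => [r t, c t + (if i ≤ t ∧ t < i + K then d else 0), 0]))
          ((i : Int) + (K : Int)) [] = [r (i + K), c (i + K), 0] := by
        rw [hcast, pyGetD_mapRange _ _ _ _ hin]
        simp
      rw [hread, rowGet1, rowSet1, hcast, PySem.List.pySetD_natCast, set_mapRange _ _ _ _ hin]
      apply List.map_congr_left
      intro t ht
      rcases eq_or_ne t (i + K) with rfl | hne
      · have h1 : i ≤ i + K ∧ i + K < i + (K + 1) := by omega
        simp [h1]
      · have hiff : (i ≤ t ∧ t < i + K) ↔ (i ≤ t ∧ t < i + (K + 1)) := by omega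
        simp only [if_neg hne, hiff]

theorem arrA_zero (P : List Int) (m k : Int) :
    arrA P m k 0 = (List.range P.length).map (fun _ => [0, 0, 0]) := by
  unfold arrA colA
  simp

theorem Aloop (P : List Int) (m k : Int) : ∀ J, J ≤ P.length →
    (List.range J).foldl (stepA P m k) ((List.range P.length).map (fun _ => [0, 0, 0]), 0)
      = (arrA P m k J, ansSum P m k J) := by
  intro J
  induction J with
  | zero =>
    intro _
    rw [← arrA_zero P m k]
    simp [ansSum]
  | succ J ih =>
    intro hJ
    have hJn : J < P.length := by omega
    rw [List.range_succ, List.foldl_append, ih (by omega)]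
    simp only [List.foldl_cons, List.foldl_nil]
    unfold stepA
    have hr0 : (arrA P m k J).getD J []
        = [if J < J then P.getD J 0 else 0, colA P m k J J, 0] := by
      unfold arrA; exact getD_mapRange _ _ _ _ hJn
    simp only [PySem.List.pySetD_natCast, PySem.List.pyGetD_natCast, hr0,
      if_neg (lt_irrefl J), rowSet0]
    have harr1 : (arrA P m k J).set J [P.getD J 0, colA P m k J J, 0]
        = (List.range P.length).map (fun t => [if t < J + 1 then P.getD t 0 else 0, colA P m k J t, 0]) := by
      unfold arrA
      rw [set_mapRange _ _ _ _ hJn]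
      apply List.map_congr_left
      intro t _
      rcases eq_or_ne t J with rfl | hne
      · simp
      · have : (t < J) ↔ (t < J + 1) := by omega
        simp only [if_neg hne, this]
    rw [harr1]
    rw [getD_mapRange _ _ _ _ hJn, rowGet1, colA_self]
    by_cases hpos : PySem.Int.floordiv (P.getD J 0) m - actF P m k J > 0
    · rw [if_pos hpos]
      have hnd : ndF P m k J = PySem.Int.floordiv (P.getD J 0) m - actF P m k J := by
        rw [ndF_eq, if_pos hpos]
      rw [innerA]
      simp only [Prod.mk.injEq]
      constructor
      · show _ = arrA P m k (J + 1)
        unfold arrA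
        apply List.map_congr_left
        intro t _
        rw [colA_succ, hnd]
        have hiff : (J ≤ t ∧ t < J + k.toNat) ↔ (J ≤ t ∧ (t : Int) < (J : Int) + k) := by omega
        simp only [hiff]
      · show ansSum P m k J + _ = ansSum P m k (J + 1)
        rw [ansSum_succ, hnd]
    · rw [if_neg hpos]
      have hnd : ndF P m k J = 0 := by rw [ndF_eq, if_neg hpos]
      refine Prod.ext ?_ ?_
      · show _ = arrA P m k (J + 1)
        unfold arrA
        apply List.map_congr_left
        intro t _
        rw [colA_succ, hnd]
        simp
      · show ansSum P m k J = ansSum P m k (J + 1)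
        rw [ansSum_succ, hnd, add_zero]

theorem solution_eq_ansSum (P : List Int) (m k : Int) :
    solution P m k = ansSum P m k P.length := by
  unfold solution
  simp only [PySem.List.pyRange_one, sub_zero, Int.toNat_natCast, zero_add, List.foldl_map,
    List.map_map]
  exact congrArg Prod.snd (Aloop P m k P.length le_rfl)

-- ===== B side =====

theorem sum_ite_ge (P : List Int) (m k : Int) (L : Nat) : ∀ J, L ≤ J →
    ((List.range J).map (fun (t : Nat) => if L ≤ t then ndF P m k t else 0)).sum
      = ansSum P m k J - ansSum P m k L := by
  intro J
  induction J with
  | zero =>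
    intro h
    have : L = 0 := by omega
    simp [this, ansSum]
  | succ J ih =>
    intro h
    rcases Nat.lt_or_ge J L with hJL | hLJ
    · have hLe : L = J + 1 := by omega
      subst hLe
      have hz : ((List.range (J + 1)).map (fun (t : Nat) => if J + 1 ≤ t then ndF P m k t else 0)).sum = 0 := by
        apply List.sum_eq_zero
        intro x hx
        rcases List.mem_map.mp hx with ⟨t, ht, rfl⟩
        have : t < J + 1 := List.mem_range.mp ht
        simp [show ¬ (J + 1 ≤ t) by omega]
      rw [hz]; ring
    · rw [List.range_succ, List.map_append, List.sum_append, ih hLJ]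
      simp only [List.map_cons, List.map_nil, List.sum_cons, List.sum_nil]
      rw [if_pos hLJ, ansSum_succ]
      ring

theorem actF_zero (P : List Int) (m k : Int) (J : Nat) (hk : k ≤ 0) : actF P m k J = 0 := by
  apply List.sum_eq_zero
  intro x hx
  rcases List.mem_map.mp hx with ⟨t, ht, rfl⟩
  have : t < J := List.mem_range.mp ht
  simp [show ¬ ((J : Int) < (t : Int) + k) by omega]

def stepB (P : List Int) (m k : Int) (st : List Int × Int) (j : Nat) : List Int × Int :=
  let pre := st.1
  let lo0 := ((j : Nat) : Int) - k + 1
  let lo := if lo0 < 0 then 0 else lo0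
  let act := if lo ≤ ((j : Nat) : Int) then
      PySem.List.pyGetD pre ((j : Nat) : Int) 0 - PySem.List.pyGetD pre lo 0 else 0
  let need := PySem.Int.floordiv (PySem.List.pyGetD P ((j : Nat) : Int) 0) m - act
  let add := if need > 0 then need else 0
  (pre ++ [PySem.List.pyGetD pre (-1) 0 + add], st.2 + add)

theorem Bloop (P : List Int) (m k : Int) : ∀ J, J ≤ P.length →
    (List.range J).foldl (stepB P m k) ([0], 0)
      = ((List.range (J + 1)).map (ansSum P m k), ansSum P m k J) := by
  intro J
  induction J with
  | zero =>
    intro _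
    simp [ansSum]
  | succ J ih =>
    intro hJ
    rw [List.range_succ, List.foldl_append, ih (by omega)]
    simp only [List.foldl_cons, List.foldl_nil]
    unfold stepB
    have hJ1 : J < J + 1 := Nat.lt_succ_self J
    have hgJ : PySem.List.pyGetD ((List.range (J + 1)).map (ansSum P m k)) ((J : Nat) : Int) 0
        = ansSum P m k J := pyGetD_mapRange _ _ _ _ hJ1
    have hlast : PySem.List.pyGetD ((List.range (J + 1)).map (ansSum P m k)) (-1) 0
        = ansSum P m k J := by
      rw [List.range_succ]
      simp only [List.map_append, List.map_cons, List.map_nil]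
      exact PySem.List.pyGetD_neg_one_append_singleton _ _ _
    have key : (if (if ((J : Nat) : Int) - k + 1 < 0 then 0 else ((J : Nat) : Int) - k + 1) ≤ ((J : Nat) : Int) then
          ansSum P m k J
            - PySem.List.pyGetD ((List.range (J + 1)).map (ansSum P m k))
                (if ((J : Nat) : Int) - k + 1 < 0 then 0 else ((J : Nat) : Int) - k + 1) 0
          else 0) = actF P m k J := by
      by_cases hk : k ≤ 0
      · have h0 : ¬ (((J : Nat) : Int) - k + 1 < 0) := by omega
        rw [if_neg h0, if_neg (by omega)]
        exact (actF_zero P m k J hk).symm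
      · have hk1 : 1 ≤ k := by omega
        have hL : (((J : Nat) : Int) - k + 1).toNat ≤ J := by omega
        have hlo_eq : (if ((J : Nat) : Int) - k + 1 < 0 then 0 else ((J : Nat) : Int) - k + 1)
            = (((((J : Nat) : Int) - k + 1).toNat : Nat) : Int) := by
          split_ifs with h0 <;> omega
        rw [hlo_eq, if_pos (by omega), pyGetD_mapRange _ _ _ _ (by omega)]
        rw [← sum_ite_ge P m k ((((J : Nat) : Int) - k + 1).toNat) J hL]
        unfold actF
        congr 1
        apply List.map_congr_left
        intro t ht
        have htJ : t < J := List.mem_range.mp ht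
        have hiff : ((((J : Nat) : Int) - k + 1).toNat ≤ t) ↔ ((J : Int) < (t : Int) + k) := by omega
        simp only [hiff]
    simp only [hgJ, hlast]
    rw [key, PySem.List.pyGetD_natCast]
    rw [show (if PySem.Int.floordiv (List.getD P J 0) m - actF P m k J > 0 then
        PySem.Int.floordiv (List.getD P J 0) m - actF P m k J else 0) = ndF P m k J from (ndF_eq P m k J).symm]
    simp only [Prod.mk.injEq]
    constructor
    · show (List.range (J + 1)).map (ansSum P m k) ++ [ansSum P m k J + ndF P m k J]
        = (List.range (J + 1 + 1)).map (ansSum P m k)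
      rw [List.range_succ (n := J + 1)]
      simp only [List.map_append, List.map_cons, List.map_nil]
      rw [ansSum_succ]
    · show ansSum P m k J + ndF P m k J = ansSum P m k (J + 1)
      exact (ansSum_succ P m k J).symm

theorem solution_alt_eq_ansSum (P : List Int) (m k : Int) :
    solution_alt P m k = ansSum P m k P.length := by
  unfold solution_alt
  rw [PySem.List.enumerate_eq_map_pyRange (d := 0)]
  simp only [PySem.List.pyRange_one, sub_zero, zero_add, List.foldl_map,
    List.map_map, Function.comp]
  exact congrArg Prod.snd (Bloop P m k P.length le_rfl)

-- ===== VERDICT (by name: the statement is the Claim_ definition above) =====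
theorem solution_spec : Claim_equal_solution := by
  intro players m k _ _
  unfold Spec_solution
  rw [solution_eq_ansSum, solution_alt_eq_ansSum]
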